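-- pv_equiv track=rewrite | github.com/yb-claw/hermes-agent | gateway/platforms/yuanbao.py | _merge_block_streaming_fences
-- ===== SOURCE A (Python) =====
-- def has_unclosed_fence(text: str) -> bool:
--     """
--     Detect whether the text has unclosed code block fences.
--
--     Scan line by line, toggling in/out state when encountering a line starting with ```.
--     An odd number of toggles indicates an unclosed fence.
--
--     Args:
--         text: Markdown text to check
--
--     Returns:
--         Returns True if the text ends with an unclosed fence, otherwise False
--     """
--     in_fence = False
--     for line in text.split('\n'):
--         if line.startswith('```'):
--             in_fence = not in_fence
--     return in_fence
--
-- def ends_with_table_row(text: str) -> bool: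
--     """
--     Detect whether the text ends with a table row (last non-empty line starts and ends with |).
--
--     Args:
--         text: Text to check
--
--     Returns:
--         Returns True if the last non-empty line is a table row
--     """
--     trimmed = text.rstrip()
--     if not trimmed:
--         return False
--     last_line = trimmed.split('\n')[-1].strip()
--     return last_line.startswith('|') and last_line.endswith('|')
--
-- def _infer_block_separator(prev_chunk: str, next_chunk: str) -> str:
--     """
--     Infer the separator to use between two split chunks.
--
--     Rules (aligned with TS markdown-stream.ts):
--     - Previous chunk ends with code fence or next chunk starts with fence → single newline '\\n'
--     - Previous chunk ends with table row and next chunk starts with table row → single newline '\\n' (continued table)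
--     - Otherwise → double newline '\\n\\n' (paragraph separator)
--
--     Args:
--         prev_chunk: Previous chunk
--         next_chunk: Next chunk
--
--     Returns:
--         '\\n' or '\\n\\n'
--     """
--     prev_trimmed = prev_chunk.rstrip()
--     next_trimmed = next_chunk.lstrip()
--
--     # Previous chunk ends with fence or next chunk starts with fence
--     if prev_trimmed.endswith('```') or next_trimmed.startswith('```'):
--         return '\n'
--
--     # Table continuation
--     if ends_with_table_row(prev_chunk):
--         first_line = next_trimmed.split('\n')[0].strip() if next_trimmed else ''
--         if first_line.startswith('|') and first_line.endswith('|'):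
--             return '\n'
--
--     return '\n\n'
--
-- def _merge_block_streaming_fences(chunks: list[str]) -> list[str]:
--     """
--     Stream-aware fence-conscious chunk merging.
--
--     When streaming output produces multiple chunks truncated in the middle of a fence,
--     attempt to merge adjacent chunks to complete the fence.
--
--     Rules:
--     - If chunk i has an unclosed fence and chunk i+1 starts with ```,
--         merge i+1 into i (until the fence is closed or no more chunks).
--     - Use _infer_block_separator to infer the separator during merging.
--
--     Args:
--         chunks: Original chunk list
--
--     Returns:
--         Merged chunk list (length <= original length)
--     """
--     if not chunks:
--         return []
--
--     result: list[str] = []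
--     i = 0
--     while i < len(chunks):
--         current = chunks[i]
--         # If current chunk has unclosed fence, try merging subsequent chunks
--         while has_unclosed_fence(current) and i + 1 < len(chunks):
--             sep = _infer_block_separator(current, chunks[i + 1])
--             current = current + sep + chunks[i + 1]
--             i += 1
--         result.append(current)
--         i += 1
--
--     return result
-- ===== SOURCE B (Python) =====
-- def _open_parity(text: str) -> bool:
--     return sum(1 for ln in text.split('\n') if ln[:3] == '```') % 2 == 1
--
--
-- def _tail(ch: str, prev: tuple[bool, bool]) -> tuple[bool, bool]:
--     rc = ch.rstrip()
--     if not rc: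
--         return prev
--     last = rc.rsplit('\n', 1)[-1].strip()
--     return rc[-3:] == '```', last[:1] == '|' and last[-1:] == '|'
--
--
-- def _gap(fe: bool, ft: bool, ch: str) -> str:
--     nt = ch.lstrip()
--     tight = fe or nt[:3] == '```'
--     if not tight and ft:
--         first = nt.split('\n', 1)[0].strip()
--         tight = first[:1] == '|' and first[-1:] == '|'
--     return '\n' if tight else '\n\n'
--
--
-- def _merge_block_streaming_fences(chunks: list[str]) -> list[str]:
--     out: list[str] = []
--     pend = None  # (parts, ends_fence, ends_table) of the group whose fence is still open
--     for ch in chunks: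
--         if pend is None:
--             if _open_parity(ch):
--                 pend = ([ch],) + _tail(ch, (False, False))
--             else:
--                 out.append(ch)
--         else:
--             parts, fe, ft = pend
--             parts.append(_gap(fe, ft, ch))
--             parts.append(ch)
--             if _open_parity(ch):
--                 out.append(''.join(parts))
--                 pend = None
--             else:
--                 pend = (parts,) + _tail(ch, (fe, ft))
--     if pend is not None:
--         out.append(''.join(pend[0]))
--     return out
-- ===== Notes on version B (the rewrite author's own statement) =====
-- stated objective: alternative
-- what changed: B is a single left fold over the chunks carrying an optional pending open-fence group (fence parity as a line count mod 2, trailing-line facts kept incrementally) and joins each group once, instead of A's nested while loops that rescan and re-concatenate the whole growing merged string on every merge step.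
import Mathlib
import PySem

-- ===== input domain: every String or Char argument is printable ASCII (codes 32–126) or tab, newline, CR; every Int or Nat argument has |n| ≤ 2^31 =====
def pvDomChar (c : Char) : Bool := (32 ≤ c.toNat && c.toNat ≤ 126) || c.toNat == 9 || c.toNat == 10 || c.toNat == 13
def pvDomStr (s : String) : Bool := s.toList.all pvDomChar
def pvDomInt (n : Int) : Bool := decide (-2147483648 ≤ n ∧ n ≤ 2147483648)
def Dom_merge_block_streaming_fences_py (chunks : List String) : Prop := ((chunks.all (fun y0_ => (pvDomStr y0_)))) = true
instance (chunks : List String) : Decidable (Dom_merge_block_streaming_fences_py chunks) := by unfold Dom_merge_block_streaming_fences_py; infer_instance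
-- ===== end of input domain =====

-- B is a single left fold over the chunks with an Option'al pending open-fence group
-- (parity by line count mod 2, trailing-line facts kept incrementally), replacing A's
-- nested while loops that rescan and re-concatenate the growing merged string; objective: alternative.

-- ===== PORT A =====
-- helpers work on List Char (PySem string functions are defined there); the port wraps via toList/mk
def hasUnclosedFenceA (text : List Char) : Bool :=
  (PySem.Chars.splitOn text ['\n']).foldl
    (fun inf line => if PySem.Chars.startswith line ['`','`','`'] then !inf else inf) false

def endsWithTableRowA (text : List Char) : Bool :=
  let trimmed := PySem.Chars.rstrip text
  if trimmed.isEmpty then false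
  else
    -- trimmed.split('\n')[-1]: the split list is always nonempty, so [-1] never raises
    let lastLine := PySem.Chars.strip (PySem.List.pyGetD (PySem.Chars.splitOn trimmed ['\n']) (-1) [])
    PySem.Chars.startswith lastLine ['|'] && PySem.Chars.endswith lastLine ['|']

def inferBlockSeparatorA (prev next : List Char) : List Char :=
  let prevTrimmed := PySem.Chars.rstrip prev
  let nextTrimmed := PySem.Chars.lstrip next
  if PySem.Chars.endswith prevTrimmed ['`','`','`'] || PySem.Chars.startswith nextTrimmed ['`','`','`'] then ['\n']
  else
    if endsWithTableRowA prev then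
      -- next_trimmed.split('\n')[0]: nonempty split, [0] never raises
      let firstLine := if nextTrimmed.isEmpty then []
        else PySem.Chars.strip (PySem.List.pyGetD (PySem.Chars.splitOn nextTrimmed ['\n']) 0 [])
      if PySem.Chars.startswith firstLine ['|'] && PySem.Chars.endswith firstLine ['|'] then ['\n']
      else ['\n','\n']
    else ['\n','\n']

-- the inner while loop: keep absorbing following chunks while the current one has an open fence
def absorbA (current : List Char) (rest : List (List Char)) : List Char × List (List Char) :=
  match rest with
  | [] => (current, [])
  | c :: rest' =>
    if hasUnclosedFenceA current then
      absorbA (current ++ inferBlockSeparatorA current c ++ c) rest'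
    else (current, c :: rest')

theorem absorbA_snd_length_le (current : List Char) (rest : List (List Char)) :
    (absorbA current rest).2.length ≤ rest.length := by
  induction rest generalizing current with
  | nil => simp [absorbA]
  | cons c rest' ih =>
    simp only [absorbA]
    split
    · exact le_trans (ih _) (Nat.le_succ _)
    · simp

-- the outer while loop over the chunk list
def goA : List (List Char) → List (List Char)
  | [] => []
  | c :: rest =>
    let p := absorbA c rest
    p.1 :: goA p.2
termination_by l => l.length
decreasing_by
  simpa using Nat.lt_succ_of_le (absorbA_snd_length_le c rest)

def merge_block_streaming_fences_py (chunks : List String) : List String :=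
  if chunks.isEmpty then []
  else (goA (chunks.map String.toList)).map (fun cs => String.ofList cs)

-- ===== PORT B =====
-- sum(1 for ln in text.split('\n') if ln[:3] == '```') % 2 == 1
def openParityB (text : List Char) : Bool :=
  ((PySem.Chars.splitOn text ['\n']).countP (fun ln => ln.take 3 == ['`','`','`'])) % 2 == 1

-- rc.rsplit('\n', 1)[-1] is the segment after the last '\n', ported exactly as
-- reverse/takeWhile/reverse; rc[-3:] and last[:1], last[-1:] are take/drop slices (exact: len ≥ 0)
def tailB (ch : List Char) (prev : Bool × Bool) : Bool × Bool :=
  let rc := PySem.Chars.rstrip ch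
  if rc.isEmpty then prev
  else
    let last := PySem.Chars.strip ((rc.reverse.takeWhile (· ≠ '\n')).reverse)
    (rc.drop (rc.length - 3) == ['`','`','`'],
     (last.take 1 == ['|']) && (last.drop (last.length - 1) == ['|']))

-- nt.split('\n', 1)[0] is the segment before the first '\n', ported exactly as takeWhile
def gapB (fe ft : Bool) (ch : List Char) : List Char :=
  let nt := PySem.Chars.lstrip ch
  let tight0 := fe || (nt.take 3 == ['`','`','`'])
  let tight := if !tight0 && ft then
      let first := PySem.Chars.strip (nt.takeWhile (· ≠ '\n'))
      (first.take 1 == ['|']) && (first.drop (first.length - 1) == ['|'])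
    else tight0
  if tight then ['\n'] else ['\n','\n']

-- one iteration of B's fold: state = (finished groups, optional pending open group)
def stepB (s : List (List Char) × Option (List (List Char) × (Bool × Bool))) (ch : List Char) :
    List (List Char) × Option (List (List Char) × (Bool × Bool)) :=
  match s with
  | (out, none) =>
    if openParityB ch then (out, some ([ch], tailB ch (false, false)))
    else (out ++ [ch], none)
  | (out, some (parts, st)) =>
    let parts' := parts ++ [gapB st.1 st.2 ch, ch]
    if openParityB ch then (out ++ [PySem.Chars.join [] parts'], none)
    else (out, some (parts', tailB ch st))

-- the final 'if pend is not None' flush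
def flushB : List (List Char) × Option (List (List Char) × (Bool × Bool)) → List (List Char)
  | (out, none) => out
  | (out, some (parts, _)) => out ++ [PySem.Chars.join [] parts]

def merge_block_streaming_fences_py_alt (chunks : List String) : List String :=
  (flushB ((chunks.map String.toList).foldl stepB ([], none))).map (fun cs => String.ofList cs)

-- ===== PRECONDITION & SPEC =====
def Spec_merge_block_streaming_fences_py (chunks : List String) (out : List String) : Prop := out = merge_block_streaming_fences_py_alt chunks
instance (chunks : List String) (out : List String) : Decidable (Spec_merge_block_streaming_fences_py chunks out) := by unfold Spec_merge_block_streaming_fences_py; infer_instance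

-- ===== CLAIM (what is proved, stated in full; the proofs are below) =====
def Claim_equal_merge_block_streaming_fences_py : Prop := ∀ (chunks : List String), Dom_merge_block_streaming_fences_py chunks → Spec_merge_block_streaming_fences_py chunks (merge_block_streaming_fences_py chunks)

-- ===== LEMMAS AND PROOFS =====

-- splitting a string on a single character, as a plain structural recursion
def linesBy (a : Char) : List Char → List (List Char)
  | [] => [[]]
  | c :: rest => if c = a then [] :: linesBy a rest else (linesBy a rest).modifyHead (c :: ·)

theorem linesBy_ne_nil (a : Char) (s : List Char) : linesBy a s ≠ [] := by
  cases s with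
  | nil => simp [linesBy]
  | cons c rest =>
    simp only [linesBy]
    split
    · simp
    · cases h : linesBy a rest with
      | nil => exact absurd h (linesBy_ne_nil a rest)
      | cons p t => simp

theorem splitOn_go_single (a : Char) :
    ∀ (l : List Char) (fuel : Nat) (cur : List Char) (acc : List (List Char)),
    l.length ≤ fuel →
    PySem.Chars.splitOn.go [a] fuel l cur acc
      = acc.reverse ++ (linesBy a l).modifyHead (cur.reverse ++ ·) := by
  intro l
  induction l with
  | nil =>
    intro fuel cur acc _
    cases fuel <;> simp [PySem.Chars.splitOn.go, linesBy]
  | cons c rest ih =>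
    intro fuel cur acc hf
    cases fuel with
    | zero => simp at hf
    | succ fuel =>
      simp only [PySem.Chars.splitOn.go]
      simp only [List.length_cons] at hf
      by_cases hc : c = a
      · subst hc
        rw [if_pos (by simp [List.isPrefixOf])]
        simp only [List.length_cons, List.length_nil, Nat.zero_add, List.drop_succ_cons,
          List.drop_zero]
        rw [ih fuel [] (cur.reverse :: acc) (by omega)]
        simp only [linesBy, List.reverse_nil, List.nil_append]
        cases h : linesBy c rest with
        | nil => exact absurd h (linesBy_ne_nil c rest)
        | cons p t => simp
      · rw [if_neg (by simp [List.isPrefixOf]; exact fun h => absurd h.symm hc),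
          ih fuel (c :: cur) acc (by omega)]
        simp only [linesBy, if_neg hc, List.reverse_cons]
        cases h : linesBy a rest with
        | nil => exact absurd h (linesBy_ne_nil a rest)
        | cons p t => simp

theorem splitOn_single (a : Char) (s : List Char) :
    PySem.Chars.splitOn s [a] = linesBy a s := by
  unfold PySem.Chars.splitOn
  rw [splitOn_go_single a s (s.length + 1) [] [] (by omega)]
  cases h : linesBy a s with
  | nil => exact absurd h (linesBy_ne_nil a s)
  | cons p t => simp

theorem linesBy_append_sep (a : Char) (x y : List Char) :
    linesBy a (x ++ a :: y) = linesBy a x ++ linesBy a y := by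
  induction x with
  | nil => simp [linesBy]
  | cons c x' ih =>
    by_cases hc : c = a
    · subst hc; simp [linesBy, ih]
    · simp only [List.cons_append, linesBy, if_neg hc, ih]
      cases h : linesBy a x' with
      | nil => exact absurd h (linesBy_ne_nil a x')
      | cons p t => simp

-- the fence-toggle fold starts from an arbitrary accumulator as an xor
theorem foldl_toggle_init (q : List Char → Bool) (l : List (List Char)) :
    ∀ b : Bool, l.foldl (fun b line => if q line then !b else b) b
      = xor b (l.foldl (fun b line => if q line then !b else b) false) := by
  induction l with
  | nil => intro b; simp
  | cons x t ih =>
    intro b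
    simp only [List.foldl_cons]
    rw [ih (if q x then !b else b), ih (if q x then !false else false)]
    cases hq : q x <;> cases b <;> simp

theorem hA_append_nl (x y : List Char) :
    hasUnclosedFenceA (x ++ '\n' :: y) = xor (hasUnclosedFenceA x) (hasUnclosedFenceA y) := by
  unfold hasUnclosedFenceA
  rw [splitOn_single, splitOn_single, splitOn_single, linesBy_append_sep, List.foldl_append,
    foldl_toggle_init]

theorem hA_nil : hasUnclosedFenceA [] = false := by decide

theorem hA_append_sep (x y s : List Char) (hs : s = ['\n'] ∨ s = ['\n', '\n']) :
    hasUnclosedFenceA (x ++ s ++ y) = xor (hasUnclosedFenceA x) (hasUnclosedFenceA y) := by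
  rcases hs with hs | hs <;> subst hs
  · simpa using hA_append_nl x y
  · have h2 : x ++ ['\n', '\n'] ++ y = x ++ '\n' :: ('\n' :: y) := by simp
    rw [h2, hA_append_nl x ('\n' :: y)]
    have h3 : ('\n' :: y) = [] ++ '\n' :: y := by simp
    rw [h3, hA_append_nl [] y, hA_nil]
    simp

theorem rstrip_append (x y : List Char) :
    PySem.Chars.rstrip (x ++ y)
      = if PySem.Chars.rstrip y = [] then PySem.Chars.rstrip x else x ++ PySem.Chars.rstrip y := by
  unfold PySem.Chars.rstrip
  rw [List.reverse_append, List.dropWhile_append]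
  by_cases h : List.dropWhile PySem.Chars.isspace y.reverse = []
  · rw [if_pos (by simp [h]), if_pos (by simp [h])]
  · rw [if_neg (by simp [h]), if_neg (by simp [h])]
    simp

theorem endswith_bt_append (x rc : List Char) (h : rc ≠ []) :
    PySem.Chars.endswith (x ++ '\n' :: rc) ['`', '`', '`']
      = PySem.Chars.endswith rc ['`', '`', '`'] := by
  unfold PySem.Chars.endswith
  simp only [List.isSuffixOf, List.reverse_append, List.reverse_cons]
  match hr : rc.reverse with
  | [] => exact absurd (by simpa using congrArg List.reverse hr) h
  | [d] => simp [List.isPrefixOf]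
  | [d, e] => simp [List.isPrefixOf]
  | d :: e :: f :: t => simp [List.isPrefixOf]

-- ends_with_table_row only looks at the rstripped text
theorem ewtr_congr (a b : List Char) (h : PySem.Chars.rstrip a = PySem.Chars.rstrip b) :
    endsWithTableRowA a = endsWithTableRowA b := by
  unfold endsWithTableRowA
  rw [h]

theorem joinNil (l : List (List Char)) : PySem.Chars.join [] l = l.flatten := by
  match l with
  | [] => simp [PySem.Chars.join_nil]
  | [p] => simp [PySem.Chars.join_singleton]
  | p :: q :: t =>
    rw [PySem.Chars.join_cons_cons, joinNil (q :: t)]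
    simp

-- ---- bridges between B's slice-style tests and A's startswith/endswith/split ----

theorem take_eq_startswith (l p : List Char) (n : Nat) (hn : n = p.length) :
    (l.take n == p) = PySem.Chars.startswith l p := by
  subst hn
  rw [Bool.eq_iff_iff, beq_iff_eq, PySem.Chars.startswith_iff, List.prefix_iff_eq_take]
  exact eq_comm

theorem drop_eq_endswith (l p : List Char) (n : Nat) (hn : n = p.length) :
    (l.drop (l.length - n) == p) = PySem.Chars.endswith l p := by
  subst hn
  rw [Bool.eq_iff_iff, beq_iff_eq, PySem.Chars.endswith_iff, List.suffix_iff_eq_drop]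
  exact eq_comm

theorem toggle_eq_countP (q : List Char → Bool) (l : List (List Char)) :
    l.foldl (fun b x => if q x then !b else b) false = (l.countP q % 2 == 1) := by
  induction l with
  | nil => simp
  | cons x t ih =>
    rw [List.foldl_cons, foldl_toggle_init, ih, List.countP_cons]
    rcases Nat.mod_two_eq_zero_or_one (t.countP q) with h | h <;>
      cases hq : q x <;> simp [hq, Nat.add_mod, h]

theorem openParityB_eq (t : List Char) : openParityB t = hasUnclosedFenceA t := by
  unfold openParityB hasUnclosedFenceA
  rw [toggle_eq_countP (fun line => PySem.Chars.startswith line ['`','`','`'])]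
  have hc : (PySem.Chars.splitOn t ['\n']).countP (fun ln => ln.take 3 == ['`','`','`'])
      = (PySem.Chars.splitOn t ['\n']).countP (fun line => PySem.Chars.startswith line ['`','`','`']) :=
    List.countP_congr (fun a _ => by rw [take_eq_startswith a ['`','`','`'] 3 (by decide)])
  rw [hc]

theorem linesBy_no_sep (a : Char) (s : List Char) (h : a ∉ s) : linesBy a s = [s] := by
  induction s with
  | nil => rfl
  | cons c rest ih =>
    simp only [List.mem_cons, not_or] at h
    simp [linesBy, Ne.symm h.1, ih h.2]

theorem linesBy_two_le (a : Char) (s : List Char) (h : a ∈ s) : 2 ≤ (linesBy a s).length := by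
  induction s with
  | nil => simp at h
  | cons c rest ih =>
    by_cases hc : c = a
    · have h1 : 1 ≤ (linesBy a rest).length := List.length_pos_iff.mpr (linesBy_ne_nil a rest)
      simp only [linesBy, if_pos hc, List.length_cons]
      omega
    · have hm : a ∈ rest := by
        rcases List.mem_cons.mp h with h | h
        · exact absurd h.symm hc
        · exact h
      simpa [linesBy, hc, List.length_modifyHead] using ih hm

theorem getLast?_linesBy (a : Char) (s : List Char) :
    (linesBy a s).getLast? = some (((s.reverse.takeWhile (· ≠ a)).reverse : List Char)) := by
  induction s with
  | nil => simp [linesBy]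
  | cons c rest ih =>
    by_cases hc : c = a
    · simp only [linesBy, if_pos hc, List.reverse_cons]
      have hcons : ∀ (L : List (List Char)), L ≠ [] → (([] : List Char) :: L).getLast? = L.getLast? := by
        intro L hL
        cases L with
        | nil => exact absurd rfl hL
        | cons x t => exact List.getLast?_cons_cons
      rw [hcons _ (linesBy_ne_nil a rest), ih, List.takeWhile_append]
      have hta : List.takeWhile (fun x => decide (x ≠ a)) [c] = [] := by simp [hc]
      split_ifs with h
      · rw [hta, List.append_nil, (List.takeWhile_prefix _).eq_of_length h]
      · rfl
    · simp only [linesBy, if_neg hc, List.reverse_cons]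
      obtain ⟨x, t, hxt⟩ : ∃ x t, linesBy a rest = x :: t := by
        cases hL : linesBy a rest with
        | nil => exact absurd hL (linesBy_ne_nil a rest)
        | cons x t => exact ⟨x, t, rfl⟩
      rw [hxt, List.modifyHead_cons]
      rw [hxt] at ih
      cases t with
      | nil =>
        have hm : a ∉ rest := fun hmem => by
          have h2 := linesBy_two_le a rest hmem
          rw [hxt] at h2
          simp at h2
        have hall : List.takeWhile (fun y => decide (y ≠ a)) rest.reverse = rest.reverse :=
          List.takeWhile_eq_self_iff.mpr (fun y hy => by
            simp only [decide_eq_true_eq]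
            intro he
            exact hm (by rw [← he]; simpa using hy))
        simp only [List.getLast?_singleton] at ih ⊢
        rw [List.takeWhile_append, if_pos (by rw [hall])]
        have hx : x = rest := by
          have h3 := Option.some.inj ih
          rw [hall] at h3
          simpa using h3
        simp [hx, hc]
      | cons y t' =>
        have hm : a ∈ rest := by
          by_contra hnm
          rw [linesBy_no_sep a rest hnm] at hxt
          simp at hxt
        have hne : ¬ (List.takeWhile (fun y => decide (y ≠ a)) rest.reverse).length
            = rest.reverse.length := by
          intro hlen
          have hts := (List.takeWhile_prefix _).eq_of_length hlen
          have hall := List.takeWhile_eq_self_iff.mp hts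
          have := hall a (by simpa using hm)
          simp at this
        rw [List.getLast?_cons_cons]
        rw [List.getLast?_cons_cons] at ih
        rw [ih, List.takeWhile_append, if_neg hne]

theorem revTakeWhile_eq_pyGetD (rc : List Char) :
    ((rc.reverse.takeWhile (· ≠ '\n')).reverse : List Char)
      = PySem.List.pyGetD (PySem.Chars.splitOn rc ['\n']) (-1) [] := by
  rw [splitOn_single, PySem.List.pyGetD_neg_one _ _ (linesBy_ne_nil _ _)]
  have h := getLast?_linesBy '\n' rc
  rw [List.getLast?_eq_some_getLast (linesBy_ne_nil _ _)] at h
  exact (Option.some.inj h).symm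

theorem takeWhile_eq_pyGetD_head (s : List Char) :
    (s.takeWhile (· ≠ '\n') : List Char)
      = PySem.List.pyGetD (PySem.Chars.splitOn s ['\n']) 0 [] := by
  rw [splitOn_single]
  induction s with
  | nil => simp [linesBy, PySem.List.pyGetD_zero_cons]
  | cons c rest ih =>
    by_cases hc : c = '\n'
    · subst hc
      simp [linesBy, PySem.List.pyGetD_zero_cons]
    · simp only [linesBy, if_neg hc]
      cases hL : linesBy '\n' rest with
      | nil => exact absurd hL (linesBy_ne_nil _ _)
      | cons x t =>
        rw [hL] at ih
        rw [PySem.List.pyGetD_zero_cons] at ih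
        simp only [List.takeWhile_cons, hL, List.modifyHead_cons, PySem.List.pyGetD_zero_cons]
        simp only [decide_not] at ih ⊢
        simp [hc, ih]

-- ---- the invariant B's per-group state keeps about the string A has built so far ----

def InvSt (cur : List Char) (st : Bool × Bool) : Prop :=
  st.1 = PySem.Chars.endswith (PySem.Chars.rstrip cur) ['`', '`', '`']
    ∧ st.2 = endsWithTableRowA cur

-- B's tailB, re-expressed through A's vocabulary (proof-side only)
def tailStateA (chunk : List Char) (prev : Bool × Bool) : Bool × Bool :=
  let rc := PySem.Chars.rstrip chunk
  if rc.isEmpty then prev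
  else
    let last := PySem.Chars.strip (PySem.List.pyGetD (PySem.Chars.splitOn rc ['\n']) (-1) [])
    (PySem.Chars.endswith rc ['`', '`', '`'],
     PySem.Chars.startswith last ['|'] && PySem.Chars.endswith last ['|'])

theorem tailB_eq (c : List Char) (st : Bool × Bool) : tailB c st = tailStateA c st := by
  unfold tailB tailStateA
  by_cases h : (PySem.Chars.rstrip c).isEmpty
  · rw [if_pos h, if_pos h]
  · rw [if_neg h, if_neg h, revTakeWhile_eq_pyGetD]
    refine Prod.ext ?_ ?_
    · exact drop_eq_endswith (PySem.Chars.rstrip c) ['`','`','`'] 3 (by decide)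
    · dsimp only
      rw [take_eq_startswith _ ['|'] 1 (by decide), drop_eq_endswith _ ['|'] 1 (by decide)]

theorem gap_agree (cur c : List Char) (st : Bool × Bool) (h : InvSt cur st) :
    gapB st.1 st.2 c = inferBlockSeparatorA cur c := by
  obtain ⟨h1, h2⟩ := h
  unfold gapB inferBlockSeparatorA
  dsimp only
  rw [h1, h2, take_eq_startswith (PySem.Chars.lstrip c) ['`','`','`'] 3 (by decide)]
  have hfl : (PySem.Chars.strip ((PySem.Chars.lstrip c).takeWhile (· ≠ '\n')) : List Char)
      = (if (PySem.Chars.lstrip c).isEmpty then []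
         else PySem.Chars.strip (PySem.List.pyGetD (PySem.Chars.splitOn (PySem.Chars.lstrip c) ['\n']) 0 [])) := by
    by_cases he : (PySem.Chars.lstrip c).isEmpty
    · rw [if_pos he, List.isEmpty_iff.mp he]
      decide
    · rw [if_neg he, takeWhile_eq_pyGetD_head]
  rw [hfl]
  set first := (if (PySem.Chars.lstrip c).isEmpty then ([] : List Char)
    else PySem.Chars.strip (PySem.List.pyGetD (PySem.Chars.splitOn (PySem.Chars.lstrip c) ['\n']) 0 [])) with hfdef
  rw [take_eq_startswith first ['|'] 1 (by decide), drop_eq_endswith first ['|'] 1 (by decide)]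
  cases hb : (PySem.Chars.endswith (PySem.Chars.rstrip cur) ['`','`','`']
      || PySem.Chars.startswith (PySem.Chars.lstrip c) ['`','`','`']) <;>
    cases ht : endsWithTableRowA cur <;>
      simp [hb, ht]

theorem sepA_cases (cur c : List Char) :
    inferBlockSeparatorA cur c = ['\n'] ∨ inferBlockSeparatorA cur c = ['\n', '\n'] := by
  unfold inferBlockSeparatorA
  dsimp only
  split_ifs <;> simp

theorem rstrip_sep_nil (s : List Char) (hs : s = ['\n'] ∨ s = ['\n', '\n']) :
    PySem.Chars.rstrip s = [] := by
  rcases hs with hs | hs <;> subst hs <;> decide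

theorem rstrip_append_sep (cur c s : List Char) (hs : s = ['\n'] ∨ s = ['\n', '\n']) :
    PySem.Chars.rstrip (cur ++ s ++ c)
      = if PySem.Chars.rstrip c = [] then PySem.Chars.rstrip cur
        else cur ++ s ++ PySem.Chars.rstrip c := by
  rw [List.append_assoc, rstrip_append cur (s ++ c), rstrip_append s c]
  by_cases h : PySem.Chars.rstrip c = []
  · rw [if_pos h]
    simp [rstrip_sep_nil s hs, h]
  · rw [if_neg h, if_neg (by rcases hs with hs | hs <;> subst hs <;> simp), if_neg h]
    simp

theorem invSt_init (c : List Char) : InvSt c (tailB c (false, false)) := by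
  rw [tailB_eq]
  unfold tailStateA InvSt endsWithTableRowA
  by_cases h : (PySem.Chars.rstrip c).isEmpty
  · rw [if_pos h, if_pos h]
    constructor
    · simp only [List.isEmpty_iff] at h
      rw [h]
      decide
    · rfl
  · rw [if_neg h, if_neg h]
    exact ⟨rfl, rfl⟩

theorem lastline_append_sep (cur rc s : List Char)
    (hs : s = ['\n'] ∨ s = ['\n', '\n']) :
    PySem.List.pyGetD (PySem.Chars.splitOn (cur ++ s ++ rc) ['\n']) (-1) []
      = PySem.List.pyGetD (PySem.Chars.splitOn rc ['\n']) (-1) [] := by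
  have key : ∀ (x : List Char),
      PySem.Chars.splitOn (x ++ '\n' :: rc) ['\n']
        = PySem.Chars.splitOn x ['\n'] ++ PySem.Chars.splitOn rc ['\n'] := by
    intro x
    rw [splitOn_single, splitOn_single, splitOn_single, linesBy_append_sep]
  have heq : cur ++ s ++ rc = (cur ++ s.dropLast) ++ '\n' :: rc := by
    rcases hs with hs | hs <;> subst hs <;> simp
  rw [heq, key]
  have h2 : PySem.Chars.splitOn rc ['\n'] ≠ [] := by
    rw [splitOn_single]; exact linesBy_ne_nil _ _
  rw [PySem.List.pyGetD_neg_one _ [] (by simp [h2]), PySem.List.pyGetD_neg_one _ [] h2,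
    List.getLast_append]
  rw [dif_neg (by simpa using h2)]

theorem invSt_update (cur c : List Char) (st : Bool × Bool) (h : InvSt cur st) :
    InvSt (cur ++ inferBlockSeparatorA cur c ++ c) (tailB c st) := by
  rw [tailB_eq]
  set s := inferBlockSeparatorA cur c with hs_def
  have hs := sepA_cases cur c
  rw [← hs_def] at hs
  unfold tailStateA
  by_cases hrc : (PySem.Chars.rstrip c).isEmpty
  · rw [if_pos hrc]
    simp only [List.isEmpty_iff] at hrc
    have hr : PySem.Chars.rstrip (cur ++ s ++ c) = PySem.Chars.rstrip cur := by
      rw [rstrip_append_sep cur c s hs, if_pos hrc]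
    exact ⟨by rw [hr]; exact h.1, by rw [ewtr_congr _ cur hr]; exact h.2⟩
  · rw [if_neg hrc]
    simp only [List.isEmpty_iff] at hrc
    have hr : PySem.Chars.rstrip (cur ++ s ++ c) = cur ++ s ++ PySem.Chars.rstrip c := by
      rw [rstrip_append_sep cur c s hs, if_neg hrc]
    have hsplit : cur ++ s ++ PySem.Chars.rstrip c
        = (cur ++ s.dropLast) ++ '\n' :: PySem.Chars.rstrip c := by
      rcases hs with hs | hs <;> rw [hs] <;> simp
    constructor
    · rw [hr, hsplit, endswith_bt_append _ _ hrc]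
    · unfold endsWithTableRowA
      rw [hr]
      rw [if_neg (by simp [hsplit]), lastline_append_sep cur _ s hs]

theorem absorbA_closed (cur : List Char) (rest : List (List Char))
    (h : hasUnclosedFenceA cur = false) : absorbA cur rest = (cur, rest) := by
  cases rest with
  | nil => rfl
  | cons c rest' => simp [absorbA, h]

-- B's fold, run from either state, matches A's nested loops
theorem loopPQ (n : Nat) : ∀ (l : List (List Char)), l.length ≤ n →
    (∀ out, flushB (l.foldl stepB (out, none)) = out ++ goA l) ∧
    (∀ (out parts : List (List Char)) (cur : List Char) (st : Bool × Bool),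
      PySem.Chars.join [] parts = cur →
      hasUnclosedFenceA cur = true → InvSt cur st →
      flushB (l.foldl stepB (out, some (parts, st)))
        = out ++ (absorbA cur l).1 :: goA (absorbA cur l).2) := by
  induction n with
  | zero =>
    intro l hl
    have : l = [] := List.length_eq_zero_iff.mp (Nat.le_zero.mp hl)
    subst this
    constructor
    · intro out; simp [flushB, goA]
    · intro out parts cur st hj _ _
      simp [flushB, absorbA, goA, hj]
  | succ n ih =>
    intro l hl
    cases l with
    | nil =>
      constructor
      · intro out; simp [flushB, goA]
      · intro out parts cur st hj _ _
        simp [flushB, absorbA, goA, hj]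
    | cons c rest =>
      have hr : rest.length ≤ n := by simpa using Nat.lt_succ_iff.mp (by simpa using hl)
      constructor
      · intro out
        rw [List.foldl_cons]
        show flushB (rest.foldl stepB
          (if openParityB c then (out, some ([c], tailB c (false, false))) else (out ++ [c], none)))
          = out ++ goA (c :: rest)
        rw [openParityB_eq, goA]
        cases hb : hasUnclosedFenceA c with
        | false =>
          rw [if_neg (by simp [hb]), (ih rest hr).1 (out ++ [c]), absorbA_closed c rest hb]
          simp
        | true =>
          rw [if_pos rfl]
          exact (ih rest hr).2 out [c] c (tailB c (false, false))
            (PySem.Chars.join_singleton [] c) hb (invSt_init c)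
      · intro out parts cur st hj hU hst
        rw [List.foldl_cons]
        have hg : gapB st.1 st.2 c = inferBlockSeparatorA cur c := gap_agree cur c st hst
        have hj' : PySem.Chars.join [] (parts ++ [gapB st.1 st.2 c, c])
            = cur ++ inferBlockSeparatorA cur c ++ c := by
          rw [joinNil, List.flatten_append, ← joinNil parts, hj, hg]
          simp
        have hU' : hasUnclosedFenceA (cur ++ inferBlockSeparatorA cur c ++ c)
            = !(hasUnclosedFenceA c) := by
          rw [hA_append_sep _ _ _ (sepA_cases cur c), hU]
          cases hasUnclosedFenceA c <;> rfl
        show flushB (rest.foldl stepB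
          (if openParityB c
            then (out ++ [PySem.Chars.join [] (parts ++ [gapB st.1 st.2 c, c])], none)
            else (out, some (parts ++ [gapB st.1 st.2 c, c], tailB c st))))
          = out ++ (absorbA cur (c :: rest)).1 :: goA (absorbA cur (c :: rest)).2
        have habs : absorbA cur (c :: rest)
            = absorbA (cur ++ inferBlockSeparatorA cur c ++ c) rest := by
          simp [absorbA, hU]
        rw [openParityB_eq, habs]
        cases hb : hasUnclosedFenceA c with
        | false =>
          rw [if_neg (by simp [hb])]
          exact (ih rest hr).2 out _ _ (tailB c st) hj'
            (by rw [hU', hb]; rfl) (hg ▸ invSt_update cur c st hst)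
        | true =>
          rw [if_pos rfl, (ih rest hr).1, absorbA_closed _ rest (by rw [hU', hb]; rfl), hj']
          simp

-- ===== VERDICT (by name: the statement is the Claim_ definition above) =====
theorem merge_block_streaming_fences_py_spec : Claim_equal_merge_block_streaming_fences_py := by
  intro chunks _
  unfold Spec_merge_block_streaming_fences_py merge_block_streaming_fences_py
    merge_block_streaming_fences_py_alt
  by_cases h : chunks.isEmpty
  · simp only [List.isEmpty_iff] at h
    subst h
    simp [flushB]
  · rw [if_neg (by simp [h]),
      (loopPQ (chunks.map String.toList).length _ le_rfl).1 []]
    simp
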